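-- pv_equiv track=rewrite | github.com/Leodore59/org_to_anki | org_to_anki/org_parser/DeckBuilder.py | _sortTopicsSubDeck
-- ===== SOURCE A (Python) =====
-- def _sortTopicsSubDeck(questions):
--
--     subSections = []
--     currentSection = []
--
--     for line in questions:
--         # first line
--         noAstrics = line.split(' ')[0].count('*', 0, 10)
--         if noAstrics == 1:
--             if len(currentSection) > 0:
--                 subDeck = currentSection[:]
--                 currentSection = []
--                 subSections.append(subDeck)
--             currentSection.append(line)
--         elif noAstrics > 1 or line.strip()[0] == "#":
--             currentSection.append(line)
--         else:
--             raise Exception("Issue parsing topics deck.")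
--
--     subSections.append(currentSection[:])
--
--     return subSections
-- ===== SOURCE B (Python) =====
-- def _sortTopicsSubDeck(questions):
--     # Build the sections back-to-front: walk the lines in reverse, prepending
--     # each line to the front group and opening a fresh group after a boundary.
--     result = [[]]
--     for line in reversed(questions):
--         noAstrics = line.split(' ')[0].count('*', 0, 10)
--         if noAstrics == 1:
--             result[0] = [line] + result[0]
--             result.insert(0, [])
--         elif noAstrics > 1 or line.strip()[0] == "#":
--             result[0] = [line] + result[0]
--         else:
--             raise Exception("Issue parsing topics deck.")
--     if len(result) > 1 and not result[0]:
--         result.pop(0)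
--     return result
-- ===== Notes on version B (the rewrite author's own statement) =====
-- stated objective: alternative
-- what changed: B builds the subsections back-to-front in a single reverse pass, prepending each line to the front group and opening a new group after each single-asterisk boundary, instead of A's forward pass that copies and flushes a current-section buffer at each boundary.
import Mathlib
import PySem

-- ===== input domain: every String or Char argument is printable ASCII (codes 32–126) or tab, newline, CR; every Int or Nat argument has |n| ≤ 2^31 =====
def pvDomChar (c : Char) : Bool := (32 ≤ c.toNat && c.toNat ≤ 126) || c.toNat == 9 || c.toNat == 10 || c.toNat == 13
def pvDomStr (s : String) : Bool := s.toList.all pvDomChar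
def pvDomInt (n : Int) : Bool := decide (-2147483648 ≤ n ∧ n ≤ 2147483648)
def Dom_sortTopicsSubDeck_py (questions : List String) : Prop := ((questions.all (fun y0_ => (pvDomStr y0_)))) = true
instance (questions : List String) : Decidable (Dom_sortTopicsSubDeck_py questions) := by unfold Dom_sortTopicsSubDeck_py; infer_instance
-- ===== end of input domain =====

-- B builds the output back-to-front in one reverse pass (alternative decomposition, same cost).
-- Pre_ excludes the inputs on which the Python A raises (a line whose first space-split token has
-- no '*' in its first 10 chars and whose stripped form is empty or does not start with '#').

-- ===== PORT A =====
-- line.split(' ')[0].count('*', 0, 10)  (shared by both Pythons verbatim)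
def pyNoAstrics (line : String) : Nat :=
  PySem.Str.count
    (PySem.Str.slice (((PySem.Str.split? line " ").getD []).headD "") none (some 10)) "*"

-- the body of A's for-loop; state = (subSections, currentSection); the Python raises in the
-- final branch, here the state is returned unchanged (those inputs are outside Pre_)
def sortTopicsSubDeck_stepA (st : List (List String) × List String) (line : String) :
    List (List String) × List String :=
  let noAstrics := pyNoAstrics line
  if noAstrics == 1 then
    if st.2.length > 0 then (st.1 ++ [st.2], [] ++ [line])
    else (st.1, st.2 ++ [line])
  else if noAstrics > 1 || ((PySem.Str.strip line).toList.head? == some '#') then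
    (st.1, st.2 ++ [line])
  else st

def sortTopicsSubDeck_py (questions : List String) : List (List String) :=
  let st := questions.foldl sortTopicsSubDeck_stepA ([], [])
  st.1 ++ [st.2]

-- ===== PORT B =====
-- the body of B's reversed for-loop ('for line in reversed(questions)' with an accumulated
-- result list = foldr); the Python raises in the final branch, here the state is unchanged
def sortTopicsSubDeck_stepB (line : String) (result : List (List String)) :
    List (List String) :=
  let noAstrics := pyNoAstrics line
  if noAstrics == 1 then [] :: (line :: result.headD []) :: result.tail
  else if noAstrics > 1 || ((PySem.Str.strip line).toList.head? == some '#') then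
    (line :: result.headD []) :: result.tail
  else result

def sortTopicsSubDeck_py_alt (questions : List String) : List (List String) :=
  let result := questions.foldr sortTopicsSubDeck_stepB [[]]
  if result.length > 1 && result.headD [] == [] then result.tail else result

-- ===== PRECONDITION & SPEC =====
-- exactly the inputs on which the Python A returns: every line either has a '*' in its first
-- token (first 10 chars) or strips to a string starting with '#'; otherwise A raises
def Pre_sortTopicsSubDeck_py (questions : List String) : Prop :=
  ∀ l ∈ questions, 1 ≤ pyNoAstrics l ∨ (PySem.Str.strip l).toList.head? = some '#'
instance (questions : List String) : Decidable (Pre_sortTopicsSubDeck_py questions) := by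
  unfold Pre_sortTopicsSubDeck_py; infer_instance

def pvWitness_sortTopicsSubDeck_py : List String :=
  ["* Topic", "** Question", "# comment", "* Other"]

def Spec_sortTopicsSubDeck_py (questions : List String) (out : List (List String)) : Prop :=
  out = sortTopicsSubDeck_py_alt questions
instance (questions : List String) (out : List (List String)) :
    Decidable (Spec_sortTopicsSubDeck_py questions out) := by
  unfold Spec_sortTopicsSubDeck_py; infer_instance

-- ===== CLAIM (what is proved, stated in full; the proofs are below) =====
def Claim_equal_sortTopicsSubDeck_py : Prop :=
  ∀ (questions : List String), Dom_sortTopicsSubDeck_py questions →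
    Pre_sortTopicsSubDeck_py questions →
    Spec_sortTopicsSubDeck_py questions (sortTopicsSubDeck_py questions)

-- ===== LEMMAS AND PROOFS =====

-- reference grouping function both ports are reduced to
def pvGrp (cur : List String) : List String → List (List String)
  | [] => [cur]
  | l :: ls =>
    let n := pyNoAstrics l
    if n == 1 then
      if cur.isEmpty then pvGrp [l] ls else cur :: pvGrp [l] ls
    else if n > 1 || ((PySem.Str.strip l).toList.head? == some '#') then
      pvGrp (cur ++ [l]) ls
    else pvGrp cur ls

-- unfolding equations, stated with the raw Bool conditions so if_pos/if_neg apply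
theorem pvGrp_cons (cur : List String) (l : String) (ls : List String) :
    pvGrp cur (l :: ls) =
      if (pyNoAstrics l == 1) = true then
        (if cur.isEmpty = true then pvGrp [l] ls else cur :: pvGrp [l] ls)
      else if (decide (pyNoAstrics l > 1)
              || ((PySem.Str.strip l).toList.head? == some '#')) = true then
        pvGrp (cur ++ [l]) ls
      else pvGrp cur ls := by
  rw [pvGrp]

theorem pvStepA_eq (st : List (List String) × List String) (l : String) :
    sortTopicsSubDeck_stepA st l =
      if (pyNoAstrics l == 1) = true then
        (if st.2.length > 0 then (st.1 ++ [st.2], [] ++ [l]) else (st.1, st.2 ++ [l]))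
      else if (decide (pyNoAstrics l > 1)
              || ((PySem.Str.strip l).toList.head? == some '#')) = true then
        (st.1, st.2 ++ [l])
      else st := rfl

theorem pvStepB_eq (l : String) (res : List (List String)) :
    sortTopicsSubDeck_stepB l res =
      if (pyNoAstrics l == 1) = true then [] :: (l :: res.headD []) :: res.tail
      else if (decide (pyNoAstrics l > 1)
              || ((PySem.Str.strip l).toList.head? == some '#')) = true then
        (l :: res.headD []) :: res.tail
      else res := rfl

-- A's fold invariant
theorem pvA_inv (qs : List String) (S : List (List String)) (C : List String) :
    (qs.foldl sortTopicsSubDeck_stepA (S, C)).1 ++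
      [(qs.foldl sortTopicsSubDeck_stepA (S, C)).2] = S ++ pvGrp C qs := by
  induction qs generalizing S C with
  | nil => simp [pvGrp]
  | cons l ls ih =>
    simp only [List.foldl_cons]
    by_cases h1 : (pyNoAstrics l == 1) = true
    · cases C with
      | nil =>
        rw [show sortTopicsSubDeck_stepA (S, []) l = (S, [l]) by
          rw [pvStepA_eq, if_pos h1]; simp]
        rw [ih, pvGrp_cons, if_pos h1]
        simp
      | cons c cs =>
        rw [show sortTopicsSubDeck_stepA (S, c :: cs) l = (S ++ [c :: cs], [l]) by
          rw [pvStepA_eq, if_pos h1]; simp]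
        rw [ih, pvGrp_cons, if_pos h1]
        simp [List.append_assoc]
    · by_cases h2 :
        (decide (pyNoAstrics l > 1) || ((PySem.Str.strip l).toList.head? == some '#')) = true
      · rw [show sortTopicsSubDeck_stepA (S, C) l = (S, C ++ [l]) by
          rw [pvStepA_eq, if_neg h1, if_pos h2]]
        rw [ih, pvGrp_cons, if_neg h1, if_pos h2]
      · rw [show sortTopicsSubDeck_stepA (S, C) l = (S, C) by
          rw [pvStepA_eq, if_neg h1, if_neg h2]]
        rw [ih, pvGrp_cons, if_neg h1, if_neg h2]

theorem pvA_eq_grp (qs : List String) :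
    sortTopicsSubDeck_py qs = pvGrp [] qs := by
  have := pvA_inv qs [] []
  simpa [sortTopicsSubDeck_py] using this

-- B's core fold never returns the empty list
theorem pvB_core_ne_nil (qs : List String) :
    qs.foldr sortTopicsSubDeck_stepB [[]] ≠ [] := by
  induction qs with
  | nil => simp
  | cons l ls ih =>
    simp only [List.foldr_cons]
    rw [pvStepB_eq]
    split_ifs <;> simp_all

-- B's core fold against pvGrp with a nonempty current section
theorem pvB_inv (qs : List String) (x : String) (cur : List String) :
    pvGrp (x :: cur) qs =
      ((x :: cur) ++ (qs.foldr sortTopicsSubDeck_stepB [[]]).headD []) ::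
        (qs.foldr sortTopicsSubDeck_stepB [[]]).tail := by
  induction qs generalizing x cur with
  | nil => simp [pvGrp]
  | cons l ls ih =>
    obtain ⟨r, rs, hR⟩ : ∃ r rs, ls.foldr sortTopicsSubDeck_stepB [[]] = r :: rs := by
      cases h : ls.foldr sortTopicsSubDeck_stepB [[]] with
      | nil => exact absurd h (pvB_core_ne_nil ls)
      | cons r rs => exact ⟨r, rs, rfl⟩
    simp only [List.foldr_cons]
    rw [pvStepB_eq, pvGrp_cons]
    by_cases h1 : (pyNoAstrics l == 1) = true
    · rw [if_pos h1, if_pos h1, if_neg (by simp : ¬(x :: cur).isEmpty = true)]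
      rw [ih l [], hR]
      simp
    · rw [if_neg h1, if_neg h1]
      by_cases h2 :
        (decide (pyNoAstrics l > 1) || ((PySem.Str.strip l).toList.head? == some '#')) = true
      · rw [if_pos h2, if_pos h2]
        rw [show (x :: cur) ++ [l] = x :: (cur ++ [l]) by simp]
        rw [ih x (cur ++ [l]), hR]
        simp
      · rw [if_neg h2, if_neg h2]
        exact ih x cur

-- the trailing trim of B, as a named function of the fold result
def pvTrim (R : List (List String)) : List (List String) :=
  if R.length > 1 && R.headD [] == [] then R.tail else R

theorem pvAlt_eq_trim (qs : List String) :
    sortTopicsSubDeck_py_alt qs = pvTrim (qs.foldr sortTopicsSubDeck_stepB [[]]) := rfl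

theorem pvB_eq_grp (qs : List String) :
    sortTopicsSubDeck_py_alt qs = pvGrp [] qs := by
  induction qs with
  | nil => rfl
  | cons l ls ih =>
    obtain ⟨r, rs, hR⟩ : ∃ r rs, ls.foldr sortTopicsSubDeck_stepB [[]] = r :: rs := by
      cases h : ls.foldr sortTopicsSubDeck_stepB [[]] with
      | nil => exact absurd h (pvB_core_ne_nil ls)
      | cons r rs => exact ⟨r, rs, rfl⟩
    rw [pvAlt_eq_trim, List.foldr_cons, pvStepB_eq, pvGrp_cons, hR]
    by_cases h1 : (pyNoAstrics l == 1) = true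
    · -- boundary first line: the trim drops the leading empty group
      rw [if_pos h1, if_pos h1, if_pos (by simp : (([] : List String)).isEmpty = true)]
      rw [pvB_inv ls l [], hR]
      simp [pvTrim]
    · rw [if_neg h1, if_neg h1]
      by_cases h2 :
        (decide (pyNoAstrics l > 1) || ((PySem.Str.strip l).toList.head? == some '#')) = true
      · -- content first line: the head group is nonempty, nothing trimmed
        rw [if_pos h2, if_pos h2]
        rw [show ([] : List String) ++ [l] = [l] by simp]
        rw [pvB_inv ls l [], hR]
        simp [pvTrim]
      · -- skipped line (outside Pre_, both ports skip it)
        rw [if_neg h2, if_neg h2, ← ih, pvAlt_eq_trim, hR]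

-- ===== VERDICT (by name: the statement is the Claim_ definition above) =====
theorem sortTopicsSubDeck_py_spec : Claim_equal_sortTopicsSubDeck_py := by
  intro qs _ _
  unfold Spec_sortTopicsSubDeck_py
  rw [pvA_eq_grp, pvB_eq_grp]
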